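-- pv_equiv track=rewrite | github.com/CatilonyZhang/CriticGPT-Lean | math_tree/autoformalizer/autoformalizer/data_utils/process_statement.py | insert_informal
-- ===== SOURCE A (Python) =====
-- def insert_informal(statement, informal):
--     """
--     Insert the informal problem as comment before the formal statement.
--     If informal problem is found in the statement, it will return the original statement.
--     WARNING: If theorem is not found in the statement, it will return the original statement.
--
--     Args:
--         statement (str): The formal statement. It is supposed to be splitable to 2 parts:
--             1. Headers such as import Mathlib, and other definitions.
--             2. The formal problem with sorry
--         informal (str): The informal problem.
--     """
--     if "theorem" not in statement:
--         return statement
--     if informal in statement: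
--         return statement
--     # split by \n and find the key word theorem
--     lines = statement.split("\n")
--     for i, line in enumerate(lines):
--         if "theorem" in line:
--             break
--
--     updated = "\n".join(lines[:i] + [f"/- {informal} -/"] + lines[i:])
--     return updated
-- ===== SOURCE B (Python) =====
-- def insert_informal(statement, informal):
--     if "theorem" not in statement:
--         return statement
--     if informal in statement:
--         return statement
--     out = ""
--     rest = statement
--     while "\n" in rest:
--         line, tail = rest.split("\n", 1)
--         if "theorem" in line:
--             break
--         out += line + "\n"
--         rest = tail
--     return out + f"/- {informal} -/\n" + rest
-- ===== Notes on version B (the rewrite author's own statement) =====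
-- stated objective: alternative
-- what changed: B replaces A's split-into-a-list-of-lines, enumerate-with-break index scan and list-splice-plus-join by a single streaming pass that peels one line at a time off the string with split('\n', 1), emitting finished lines and inserting the comment before the first 'theorem' line (or before the last line).
import Mathlib
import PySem

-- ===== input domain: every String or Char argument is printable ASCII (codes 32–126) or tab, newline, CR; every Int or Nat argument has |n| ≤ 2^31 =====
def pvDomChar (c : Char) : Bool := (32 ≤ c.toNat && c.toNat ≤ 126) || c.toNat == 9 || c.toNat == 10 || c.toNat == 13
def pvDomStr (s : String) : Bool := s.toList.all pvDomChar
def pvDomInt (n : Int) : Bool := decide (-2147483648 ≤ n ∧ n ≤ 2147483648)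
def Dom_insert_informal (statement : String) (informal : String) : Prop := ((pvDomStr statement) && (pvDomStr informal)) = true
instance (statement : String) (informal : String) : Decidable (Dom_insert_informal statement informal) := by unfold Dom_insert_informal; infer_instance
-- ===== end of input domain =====

-- B replaces A's split-into-lines / index-scan / list-splice / join pipeline by a single streaming
-- pass that peels one line at a time off the string with split("\n", 1) (objective: alternative).

-- ===== PORT A =====
-- A's loop `for i, line in enumerate(lines): if "theorem" in line: break`:
-- the index of the first line containing "theorem"; if no line matches, the
-- loop ends with i at the LAST index (lines from str.split is never empty).
def iiFirstIdx : List (List Char) → Nat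
  | [] => 0          -- unreachable: str.split never returns an empty list
  | l :: rest =>
    if PySem.Chars.isIn "theorem".toList l then 0
    else match rest with
      | [] => 0
      | _ :: _ => iiFirstIdx rest + 1

def insert_informal (statement : String) (informal : String) : String :=
  if !(PySem.Str.isIn "theorem" statement) then statement
  else if PySem.Str.isIn informal statement then statement
  else
    -- lines = statement.split("\n")  (sep is non-empty, so split? = some (splitOn …))
    let lines := PySem.Chars.splitOn statement.toList ['\n']
    let i := iiFirstIdx lines
    -- "\n".join(lines[:i] + [f"/- {informal} -/"] + lines[i:])
    String.ofList (PySem.Chars.join ['\n']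
      (lines.take i ++ [['/', '-', ' '] ++ informal.toList ++ [' ', '-', '/']] ++ lines.drop i))

-- ===== PORT B =====
-- B's while-loop: out accumulates finished lines, rest is the unsplit remainder.
-- rest.split("\n", 1) is ported by hand: first piece = takeWhile (· ≠ '\n'),
-- second piece = (dropWhile (· ≠ '\n')).tail — exact for the 1-char separator "\n".
def iiPeel (comment : List Char) (out : List Char) (rest : List Char) : List Char :=
  if h : PySem.Chars.isIn ['\n'] rest then
    let line := rest.takeWhile (· ≠ '\n')
    if PySem.Chars.isIn "theorem".toList line then out ++ comment ++ '\n' :: rest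
    else iiPeel comment (out ++ line ++ ['\n']) ((rest.dropWhile (· ≠ '\n')).tail)
  else out ++ comment ++ '\n' :: rest
termination_by rest.length
decreasing_by
  have hm : '\n' ∈ rest := by
    obtain ⟨l, r, hlr⟩ := (PySem.Chars.isIn_iff_infix (sub := ['\n']) (s := rest)).mp h
    simp [← hlr]
  have hne : rest.dropWhile (· ≠ '\n') ≠ [] := by
    intro hnil
    have := List.dropWhile_eq_nil_iff.mp hnil _ hm
    simp at this
  have h1 : (rest.dropWhile (· ≠ '\n')).length ≤ rest.length := List.length_dropWhile_le _ _
  have h2 : 0 < (rest.dropWhile (· ≠ '\n')).length := List.length_pos_iff.mpr hne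
  simp only [List.length_tail]
  omega

def insert_informal_alt (statement : String) (informal : String) : String :=
  if !(PySem.Str.isIn "theorem" statement) then statement
  else if PySem.Str.isIn informal statement then statement
  else
    String.ofList (iiPeel (['/', '-', ' '] ++ informal.toList ++ [' ', '-', '/']) [] statement.toList)

-- ===== PRECONDITION & SPEC =====
def Spec_insert_informal (statement : String) (informal : String) (out : String) : Prop := out = insert_informal_alt statement informal
instance (statement : String) (informal : String) (out : String) : Decidable (Spec_insert_informal statement informal out) := by unfold Spec_insert_informal; infer_instance

-- ===== CLAIM (what is proved, stated in full; the proofs are below) =====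
def Claim_equal_insert_informal : Prop := ∀ (statement : String) (informal : String), Dom_insert_informal statement informal → Spec_insert_informal statement informal (insert_informal statement informal)

-- ===== LEMMAS AND PROOFS =====

-- the line structure of s: s.split("\n") computed by direct recursion
def iiLines (s : List Char) : List (List Char) :=
  s.takeWhile (· ≠ '\n') ::
    (if h : '\n' ∈ s then iiLines ((s.dropWhile (· ≠ '\n')).tail) else [])
termination_by s.length
decreasing_by
  have hne : s.dropWhile (· ≠ '\n') ≠ [] := by
    intro hnil
    have := List.dropWhile_eq_nil_iff.mp hnil _ h
    simp at this
  have h1 : (s.dropWhile (· ≠ '\n')).length ≤ s.length := List.length_dropWhile_le _ _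
  have h2 : 0 < (s.dropWhile (· ≠ '\n')).length := List.length_pos_iff.mpr hne
  simp only [List.length_tail]
  omega

-- prepend p onto the first element
def iiConsHead (p : List Char) : List (List Char) → List (List Char)
  | [] => [p]
  | x :: xs => (p ++ x) :: xs

theorem iiLines_cons_shape (s : List Char) :
    ∃ x xs, iiLines s = x :: xs := by
  rw [iiLines]; exact ⟨_, _, rfl⟩

theorem iiMem_iff_isIn (c : Char) (s : List Char) :
    PySem.Chars.isIn [c] s = true ↔ c ∈ s := by
  rw [PySem.Chars.isIn_iff_infix]
  constructor
  · intro h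
    obtain ⟨l, r, hlr⟩ := h
    simp [← hlr]
  · intro h
    obtain ⟨l, r, rfl⟩ := List.append_of_mem h
    exact ⟨l, r, by simp⟩

theorem iiLines_eq_of_mem (s : List Char) (h : '\n' ∈ s) :
    iiLines s = s.takeWhile (· ≠ '\n') :: iiLines ((s.dropWhile (· ≠ '\n')).tail) := by
  rw [iiLines, dif_pos h]

theorem iiLines_eq_of_not_mem (s : List Char) (h : '\n' ∉ s) :
    iiLines s = [s.takeWhile (· ≠ '\n')] := by
  rw [iiLines, dif_neg h]

-- the fuel-based splitOn.go computes iiLines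
theorem iiGo_eq (fuel : Nat) :
    ∀ (l cur : List Char) (accl : List (List Char)),
      l.length < fuel →
      PySem.Chars.splitOn.go ['\n'] fuel l cur accl =
        accl.reverse ++ iiConsHead cur.reverse (iiLines l) := by
  induction fuel with
  | zero => intro l cur accl h; omega
  | succ fuel ih =>
    intro l cur accl h
    cases l with
    | nil =>
      rw [PySem.Chars.splitOn.go, iiLines]
      all_goals simp [iiConsHead]
    | cons c rest =>
      by_cases hc : c = '\n'
      · subst hc
        rw [PySem.Chars.splitOn.go]
        simp only [List.isPrefixOf, beq_self_eq_true, Bool.and_self, if_true]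
        have hdrop : List.drop ['\n'].length ('\n' :: rest) = rest := rfl
        rw [hdrop, ih rest [] _ (by simp at h; omega)]
        rw [iiLines_eq_of_mem ('\n' :: rest) (by simp)]
        obtain ⟨x, xs, hx⟩ := iiLines_cons_shape ((('\n' :: rest).dropWhile (· ≠ '\n')).tail)
        simp only [List.takeWhile_cons, List.dropWhile_cons] at hx ⊢
        simp at hx ⊢
        simp [hx, iiConsHead]
      · rw [PySem.Chars.splitOn.go]
        have hpre : List.isPrefixOf ['\n'] (c :: rest) = false := by
          simp [List.isPrefixOf]; exact fun hh => absurd hh.symm hc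
        rw [if_neg (by simp [hpre])]
        rw [ih rest (c :: cur) _ (by simp at h; omega)]
        by_cases hm : '\n' ∈ rest
        · rw [iiLines_eq_of_mem (c :: rest) (List.mem_cons_of_mem _ hm),
            iiLines_eq_of_mem rest hm]
          obtain ⟨x, xs, hx⟩ := iiLines_cons_shape ((rest.dropWhile (· ≠ '\n')).tail)
          simp [List.takeWhile_cons, List.dropWhile_cons, hc, hx, iiConsHead]
        · have hm' : '\n' ∉ c :: rest := by
            intro hh
            rcases List.mem_cons.mp hh with h1 | h2
            · exact hc h1.symm
            · exact hm h2
          rw [iiLines_eq_of_not_mem (c :: rest) hm', iiLines_eq_of_not_mem rest hm]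
          simp [List.takeWhile_cons, hc, iiConsHead]

theorem iiSplitOn_eq_iiLines (s : List Char) :
    PySem.Chars.splitOn s ['\n'] = iiLines s := by
  unfold PySem.Chars.splitOn
  rw [iiGo_eq (s.length + 1) s [] [] (by omega)]
  obtain ⟨x, xs, hx⟩ := iiLines_cons_shape s
  simp [hx, iiConsHead]

theorem iiJoin_cons (sep x : List Char) (ys : List (List Char)) (h : ys ≠ []) :
    PySem.Chars.join sep (x :: ys) = x ++ sep ++ PySem.Chars.join sep ys := by
  cases ys with
  | nil => exact absurd rfl h
  | cons y ys => exact PySem.Chars.join_cons_cons sep x y ys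

theorem iiJoin_iiLines (s : List Char) :
    PySem.Chars.join ['\n'] (iiLines s) = s := by
  induction s using iiLines.induct with
  | _ s ih =>
    by_cases h : '\n' ∈ s
    case neg =>
      rw [iiLines_eq_of_not_mem s h, PySem.Chars.join_singleton]
      rw [List.takeWhile_eq_self_iff.mpr]
      intro x hx
      simp
      exact fun hh => h (hh ▸ hx)
    case pos =>
    have ih := ih h
    rw [iiLines_eq_of_mem s h]
    rw [iiJoin_cons _ _ _ (by obtain ⟨x, xs, hx⟩ := iiLines_cons_shape ((s.dropWhile (· ≠ '\n')).tail); rw [hx]; simp), ih]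
    have hne : s.dropWhile (· ≠ '\n') ≠ [] := by
      intro hnil
      have := List.dropWhile_eq_nil_iff.mp hnil _ h
      simp at this
    obtain ⟨a, t, hat⟩ := List.exists_cons_of_ne_nil hne
    have hhead : a = '\n' := by
      have := List.head_dropWhile_not (fun c => decide (c ≠ '\n')) hne
      simp only [hat, List.head_cons] at this
      simpa using this
    have hdecomp : s.dropWhile (· ≠ '\n') = '\n' :: (s.dropWhile (· ≠ '\n')).tail := by
      rw [hat, hhead]
      rfl
    conv_rhs => rw [← List.takeWhile_append_dropWhile (p := fun c => decide (c ≠ '\n')) (l := s)]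
    rw [hdecomp]
    simp

-- the heart: B's streaming loop equals A's splice-and-join on the line list
theorem iiPeel_eq (comment : List Char) (rest out : List Char) :
    iiPeel comment out rest =
      out ++ PySem.Chars.join ['\n']
        ((iiLines rest).take (iiFirstIdx (iiLines rest)) ++ [comment] ++
         (iiLines rest).drop (iiFirstIdx (iiLines rest))) := by
  induction out, rest using iiPeel.induct with
  | case1 out rest h line hline =>
    rw [iiPeel]
    rw [dif_pos h, if_pos hline]
    have hm : '\n' ∈ rest := (iiMem_iff_isIn '\n' rest).mp h
    rw [iiLines_eq_of_mem rest hm]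
    obtain ⟨x, xs, hx⟩ := iiLines_cons_shape ((rest.dropWhile (· ≠ '\n')).tail)
    have hfi : iiFirstIdx (rest.takeWhile (· ≠ '\n') :: iiLines ((rest.dropWhile (· ≠ '\n')).tail)) = 0 := by
      simp only [iiFirstIdx]
      rw [if_pos hline]
    rw [hfi]
    simp only [List.take_zero, List.drop_zero, List.nil_append, List.singleton_append]
    rw [iiJoin_cons _ _ _ (by simp)]
    rw [← iiLines_eq_of_mem rest hm, iiJoin_iiLines]
    simp
  | case2 out rest h line hline ih =>
    rw [iiPeel]
    rw [dif_pos h, if_neg hline]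
    have hm : '\n' ∈ rest := (iiMem_iff_isIn '\n' rest).mp h
    rw [ih]
    rw [iiLines_eq_of_mem rest hm]
    obtain ⟨x, xs, hx⟩ := iiLines_cons_shape ((rest.dropWhile (· ≠ '\n')).tail)
    have hfi : iiFirstIdx (rest.takeWhile (· ≠ '\n') :: iiLines ((rest.dropWhile (· ≠ '\n')).tail)) =
        iiFirstIdx (iiLines ((rest.dropWhile (· ≠ '\n')).tail)) + 1 := by
      simp only [iiFirstIdx]
      rw [if_neg hline, hx]
    rw [hfi]
    simp only [List.take_succ_cons, List.drop_succ_cons, List.cons_append]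
    rw [iiJoin_cons _ _ _ (by simp)]
    simp only [List.append_assoc]
    rfl
  | case3 out rest h =>
    rw [iiPeel, dif_neg h]
    have hm : '\n' ∉ rest := fun hh => h ((iiMem_iff_isIn '\n' rest).mpr hh)
    rw [iiLines_eq_of_not_mem rest hm]
    have htw : rest.takeWhile (· ≠ '\n') = rest := by
      rw [List.takeWhile_eq_self_iff.mpr]
      intro x hx
      simp
      exact fun hh => hm (hh ▸ hx)
    rw [htw]
    have hfi : iiFirstIdx [rest] = 0 := by
      simp only [iiFirstIdx]
      split <;> rfl
    rw [hfi]
    simp only [List.take_zero, List.drop_zero, List.nil_append, List.singleton_append]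
    rw [iiJoin_cons _ _ _ (by simp), PySem.Chars.join_singleton]
    simp

-- ===== VERDICT (by name: the statement is the Claim_ definition above) =====
theorem insert_informal_spec : Claim_equal_insert_informal := by
  intro statement informal _
  unfold Spec_insert_informal insert_informal insert_informal_alt
  by_cases h1 : PySem.Chars.isIn ['t', 'h', 'e', 'o', 'r', 'e', 'm'] statement.toList
  · by_cases h2 : PySem.Chars.isIn informal.toList statement.toList
    · simp [PySem.Str.isIn, h1, h2]
    · simp only [PySem.Str.isIn, h1, h2, Bool.not_true, if_false, Bool.false_eq_true,
        if_true, Bool.not_eq_true']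
      rw [iiSplitOn_eq_iiLines, iiPeel_eq]
      simp
  · simp [PySem.Str.isIn, h1]
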